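-- pv_equiv track=rewrite | github.com/flacout/algorithm-bucket | trie_multiple_matching.py | solve
-- ===== SOURCE A (Python) =====
-- class Node:
--     def __init__ (self):
--         #self.next = [NA] * 4
--         self.next = {}
--         self.patternEnd = False
--
-- def makeTree(patterns):
--     root = Node()
--     # for each pattern
--     for pattern in patterns:
--         node = root
--         # for each char in the pattern
--         for i in range(len(pattern)):
--             c = pattern[i]
--             if c in node.next:
--                 # go to the branching node
--                 node = node.next[c]
--                 if i==len(pattern)-1:
--                     node.patternEnd = True
--             else:
--                 # create new node, and append it to child of current node
--                 node.next[c] = Node()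
--                 # go to this new node
--                 node = node.next[c]
--                 if i==len(pattern)-1:
--                     node.patternEnd = True
--     return root
--
-- def solve (text, n, patterns):
--     result = []
--     root = makeTree(patterns)
--
--     for pos in range(len(text)):
--         node = root
--         for i in range(pos, len(text)):
--             char=text[i]
--             if char in node.next:
--                 node = node.next[char]
--                 if node.patternEnd == True:
--                         result.append(pos)
--                         break
--             else: break
--
--     return result
-- ===== SOURCE B (Python) =====
-- def solve(text, n, patterns):
--     # trie-free: test the (non-empty) patterns directly as prefixes at each position
--     ps = tuple(p for p in patterns if p)
--     return [pos for pos in range(len(text)) if text.startswith(ps, pos)]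
-- ===== Notes on version B (the rewrite author's own statement) =====
-- stated objective: faster
-- what changed: B drops A's hand-built trie (Node objects, per-position char-by-char dict walk) and instead tests the non-empty patterns directly as prefixes at each position with str.startswith on a tuple of patterns.
import Mathlib
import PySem

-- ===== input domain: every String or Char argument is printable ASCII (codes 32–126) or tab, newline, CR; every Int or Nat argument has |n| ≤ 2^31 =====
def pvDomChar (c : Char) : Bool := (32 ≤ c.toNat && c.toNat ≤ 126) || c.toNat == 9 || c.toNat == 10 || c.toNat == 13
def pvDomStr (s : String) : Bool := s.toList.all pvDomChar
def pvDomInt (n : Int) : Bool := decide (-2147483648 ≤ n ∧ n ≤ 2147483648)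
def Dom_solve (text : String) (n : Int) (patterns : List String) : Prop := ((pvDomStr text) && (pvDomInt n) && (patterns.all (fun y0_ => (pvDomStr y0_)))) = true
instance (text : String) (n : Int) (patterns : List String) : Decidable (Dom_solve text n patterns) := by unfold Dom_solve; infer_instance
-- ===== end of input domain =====

-- B replaces A's hand-built trie with a direct startswith test per pattern and position (simpler, same results).

-- ===== PORT A =====
-- Python's Node (dict of children + patternEnd flag), as a mutual inductive
-- (children as an explicit assoc-list type; dict insertion order preserved).
mutual
inductive PNode : Type
  | mk : PChildren → Bool → PNode
inductive PChildren : Type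
  | nil : PChildren
  | cons : Char → PNode → PChildren → PChildren
end

-- 'c in node.next' / 'node.next[c]' : first (and only) binding for c
def findChild : PChildren → Char → Option PNode
  | .nil, _ => none
  | .cons d t rest, c => if c = d then some t else findChild rest c

-- functional rendering of mutating node.next[c] (overwrite in place / append new key)
def setChild : PChildren → Char → PNode → PChildren
  | .nil, c, t => .cons c t .nil
  | .cons d t0 rest, c, t => if c = d then .cons d t rest else .cons d t0 (setChild rest c t)

-- 'node.patternEnd = True'
def setEnd : PNode → PNode
  | .mk ch _ => .mk ch true

-- A's per-pattern insertion loop; 'i == len(pattern)-1' is 'rest is empty'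
def insertPat : PNode → List Char → PNode
  | t, [] => t
  | .mk ch e, c :: rest =>
    let child := match findChild ch c with
      | some t => t          -- existing branch: follow it
      | none => .mk .nil false  -- create a new node
    let child' := if rest.isEmpty then setEnd child else insertPat child rest
    .mk (setChild ch c child') e
termination_by t p => p.length

def makeTree (patterns : List String) : PNode :=
  patterns.foldl (fun root p => insertPat root p.toList) (.mk .nil false)

-- A's inner loop over i in range(pos, len(text)): walk the trie along text[pos:],
-- stop with True at the first patternEnd, False when a char has no edge / text ends
def walkFrom : PNode → List Char → Bool
  | _, [] => false
  | .mk ch _, c :: rest =>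
    match findChild ch c with
    | none => false
    | some (.mk ch' e) => if e then true else walkFrom (.mk ch' e) rest

def solve (text : String) (n : Int) (patterns : List String) : List Int :=
  let root := makeTree patterns
  (PySem.List.pyRange 0 (text.toList.length : Int) 1).foldl
    (fun result pos =>
      if walkFrom root (text.toList.drop pos.toNat) then result ++ [pos] else result) []

-- ===== PORT B =====
def solve_alt (text : String) (n : Int) (patterns : List String) : List Int :=
  let ps := patterns.filter (fun p => !p.toList.isEmpty)  -- 'tuple(p for p in patterns if p)'
  (PySem.List.pyRange 0 (text.toList.length : Int) 1).filter
    (fun pos => ps.any (fun p =>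
      -- 'text.startswith(ps, pos)' (exact: 0 ≤ pos ≤ len(text) here)
      p.toList.isPrefixOf (text.toList.drop pos.toNat)))

-- ===== PRECONDITION & SPEC =====
def Spec_solve (text : String) (n : Int) (patterns : List String) (out : List Int) : Prop := out = solve_alt text n patterns
instance (text : String) (n : Int) (patterns : List String) (out : List Int) : Decidable (Spec_solve text n patterns out) := by unfold Spec_solve; infer_instance

-- ===== CLAIM (what is proved, stated in full; the proofs are below) =====
def Claim_equal_solve : Prop := ∀ (text : String) (n : Int) (patterns : List String), Dom_solve text n patterns → Spec_solve text n patterns (solve text n patterns)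

-- ===== LEMMAS AND PROOFS =====

-- the trie walked down s ends at a patternEnd node
def pendAt : PNode → List Char → Bool
  | .mk _ e, [] => e
  | .mk ch _, c :: rest =>
    match findChild ch c with
    | none => false
    | some t => pendAt t rest
termination_by t s => s.length

theorem findChild_setChild : ∀ (ch : PChildren) (c d : Char) (t : PNode),
    findChild (setChild ch c t) d = if d = c then some t else findChild ch d
  | .nil, c, d, t => by by_cases h : d = c <;> simp [setChild, findChild, h]
  | .cons d0 t0 rest, c, d, t => by
    by_cases hc : c = d0
    · subst hc
      by_cases h : d = c <;> simp [setChild, findChild, h]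
    · by_cases h : d = d0
      · subst h
        simp [setChild, findChild, hc, Ne.symm hc]
      · simp [setChild, findChild, hc, h, findChild_setChild rest c d t]

theorem pendAt_empty (s : List Char) : pendAt (.mk .nil false) s = false := by
  cases s <;> simp [pendAt, findChild]

theorem pendAt_setEnd (t : PNode) (s : List Char) :
    pendAt (setEnd t) s = (pendAt t s || s.isEmpty) := by
  cases t with
  | mk ch e => cases s <;> simp [setEnd, pendAt]

theorem pendAt_insert (p : List Char) (t : PNode) (s : List Char) :
    pendAt (insertPat t p) s = (pendAt t s || (decide (s = p) && !p.isEmpty)) := by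
  induction p generalizing t s with
  | nil => simp [insertPat]
  | cons c rest ih =>
    cases t with
    | mk ch e =>
      cases s with
      | nil => simp [insertPat, pendAt]
      | cons d srest =>
        simp only [insertPat, pendAt, findChild_setChild]
        by_cases hd : d = c
        · subst hd
          simp only [if_true]
          cases hfc : findChild ch d with
          | none =>
            cases hrest : rest.isEmpty with
            | false => simp [hrest, ih, pendAt_empty]
            | true =>
              have hr : rest = [] := by simpa using hrest
              subst hr
              cases srest <;> simp [pendAt_setEnd, pendAt_empty]
          | some tc =>
            cases hrest : rest.isEmpty with
            | false => simp [hrest, ih]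
            | true =>
              have hr : rest = [] := by simpa using hrest
              subst hr
              cases srest <;> simp [pendAt_setEnd]
        · simp [hd]


theorem pendAt_foldl (P : List String) (t : PNode) (s : List Char) :
    pendAt (P.foldl (fun r p => insertPat r p.toList) t) s = true ↔
      pendAt t s = true ∨ (s ≠ [] ∧ ∃ p ∈ P, s = p.toList) := by
  induction P generalizing t with
  | nil => simp
  | cons q Q ih =>
    simp only [List.foldl_cons, ih, pendAt_insert, Bool.or_eq_true, Bool.and_eq_true,
      decide_eq_true_eq, Bool.not_eq_eq_eq_not, Bool.not_true, List.isEmpty_eq_false_iff,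
      List.mem_cons]
    constructor
    · rintro ((h | ⟨h1, h2⟩) | h)
      · exact Or.inl h
      · exact Or.inr ⟨by simpa [h1] using h2, q, Or.inl rfl, h1⟩
      · obtain ⟨hne, p, hp, hs⟩ := h
        exact Or.inr ⟨hne, p, Or.inr hp, hs⟩
    · rintro (h | ⟨hne, p, (rfl | hp), hs⟩)
      · exact Or.inl (Or.inl h)
      · exact Or.inl (Or.inr ⟨hs, by simpa [hs] using hne⟩)
      · exact Or.inr ⟨hne, p, hp, hs⟩


theorem walk_iff (cs : List Char) (t : PNode) :
    walkFrom t cs = true ↔ ∃ s, s ≠ [] ∧ s <+: cs ∧ pendAt t s = true := by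
  induction cs generalizing t with
  | nil =>
    simp only [walkFrom]
    constructor
    · intro h; cases t; simp [walkFrom] at h
    · rintro ⟨s, hne, hpre, _⟩
      exact absurd (List.prefix_nil.mp hpre) hne
  | cons c cs' ih =>
    cases t with
    | mk ch e =>
      simp only [walkFrom]
      cases hfc : findChild ch c with
      | none =>
        simp only [Bool.false_eq_true, false_iff]
        rintro ⟨s, hne, hpre, hp⟩
        cases s with
        | nil => exact hne rfl
        | cons d s' =>
          obtain ⟨rfl, -⟩ := List.cons_prefix_cons.mp hpre
          simp [pendAt, hfc] at hp
      | some tc =>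
        cases tc with
        | mk ch' e' =>
          cases e' with
          | true =>
            exact iff_of_true rfl ⟨[c], by simp, by simp, by simp [pendAt, hfc]⟩
          | false =>
            show walkFrom (PNode.mk ch' false) cs' = true ↔
              ∃ s, s ≠ [] ∧ s <+: c :: cs' ∧ pendAt (PNode.mk ch e) s = true
            rw [ih]
            constructor
            · rintro ⟨s', hne, hpre, hp⟩
              exact ⟨c :: s', by simp, List.cons_prefix_cons.mpr ⟨rfl, hpre⟩,
                by simpa [pendAt, hfc] using hp⟩
            · rintro ⟨s, hne, hpre, hp⟩
              cases s with
              | nil => exact absurd rfl hne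
              | cons d s' =>
                obtain ⟨rfl, hpre'⟩ := List.cons_prefix_cons.mp hpre
                simp only [pendAt, hfc] at hp
                cases s' with
                | nil => simp [pendAt] at hp
                | cons x xs => exact ⟨x :: xs, by simp, hpre', hp⟩


theorem walkFound_eq_any (patterns : List String) (cs : List Char) :
    walkFrom (makeTree patterns) cs
      = patterns.any (fun p => !p.toList.isEmpty && p.toList.isPrefixOf cs) := by
  rw [Bool.eq_iff_iff]
  rw [walk_iff]
  unfold makeTree
  constructor
  · rintro ⟨s, hne, hpre, hp⟩
    rw [pendAt_foldl] at hp
    rcases hp with h | ⟨-, p, hmem, rfl⟩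
    · exact absurd h (by simp [pendAt_empty])
    · exact List.any_eq_true.mpr ⟨p, hmem, by
        simp [List.isEmpty_eq_false_iff, List.isPrefixOf_iff_prefix.mpr hpre, hne]⟩
  · intro h
    obtain ⟨p, hmem, hp⟩ := List.any_eq_true.mp h
    simp only [Bool.and_eq_true, Bool.not_eq_eq_eq_not, Bool.not_true,
      List.isEmpty_eq_false_iff] at hp
    exact ⟨p.toList, hp.1, List.isPrefixOf_iff_prefix.mp hp.2,
      (pendAt_foldl _ _ _).mpr (Or.inr ⟨hp.1, p, hmem, rfl⟩)⟩


-- ===== VERDICT (by name: the statement is the Claim_ definition above) =====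
theorem solve_spec : Claim_equal_solve := by
  intro text n patterns _
  unfold Spec_solve solve solve_alt
  rw [PySem.List.foldl_append_if_eq_filter]
  simp only [List.nil_append]
  congr 1
  funext pos
  rw [walkFound_eq_any patterns (text.toList.drop pos.toNat), List.any_filter]
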